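-- pv_equiv track=rewrite | github.com/team-mayes/md_utils | md_utils/evbdump2data.py | sort_wat_mols
-- ===== SOURCE A (Python) =====
-- WAT_O_TYPE = 'water_o_type'
--
-- def sort_wat_mols(cfg, water_dict):
--     """
--     Sorts waters molecules
--     @param cfg: configuration for run. Used for getting atom types.
--     @param water_dict: dictionary of water atoms by molecule key
--     @return: a list that is ordered so all water atoms appear consecutively, oxygen first.
--     """
--     wat_list = []
--     for mol in water_dict:
--         h_atoms = []
--         # to make sure oxygen first, add it, then hydrogen atoms
--         for atom in water_dict[mol]:
--             if atom[2] == cfg[WAT_O_TYPE]: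
--                 wat_list.append(atom)
--             else:
--                 h_atoms.append(atom)
--         for atom in h_atoms:
--             wat_list.append(atom)
--     return wat_list
-- ===== SOURCE B (Python) =====
-- WAT_O_TYPE = 'water_o_type'
--
-- def sort_wat_mols(cfg, water_dict):
--     wat_list = []
--     for atoms in water_dict.values():
--         wat_list.extend(sorted(atoms, key=lambda a: a[2] != cfg[WAT_O_TYPE]))
--     return wat_list
-- ===== Notes on version B (the rewrite author's own statement) =====
-- stated objective: idiomatic
-- what changed: Replaces A's two-pass per-molecule partition (append oxygens immediately, buffer hydrogens, then flush the buffer) by a single stable sort per molecule keyed on the boolean 'atom type is not the oxygen type', iterating the dict values directly instead of re-looking up each key.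
import Mathlib
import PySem

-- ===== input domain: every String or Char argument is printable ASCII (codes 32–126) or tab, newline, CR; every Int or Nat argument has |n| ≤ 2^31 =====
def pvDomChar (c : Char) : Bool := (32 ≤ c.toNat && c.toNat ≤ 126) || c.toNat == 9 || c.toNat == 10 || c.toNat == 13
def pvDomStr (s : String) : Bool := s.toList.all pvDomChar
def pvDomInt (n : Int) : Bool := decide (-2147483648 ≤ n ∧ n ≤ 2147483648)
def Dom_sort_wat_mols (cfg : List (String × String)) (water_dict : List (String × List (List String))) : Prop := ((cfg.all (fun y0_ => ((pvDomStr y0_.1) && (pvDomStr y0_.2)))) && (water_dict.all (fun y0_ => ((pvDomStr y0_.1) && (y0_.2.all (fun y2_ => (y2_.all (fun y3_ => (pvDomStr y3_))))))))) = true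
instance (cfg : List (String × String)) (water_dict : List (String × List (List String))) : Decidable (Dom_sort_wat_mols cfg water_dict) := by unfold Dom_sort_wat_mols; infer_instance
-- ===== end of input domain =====

-- B replaces A's two-pass per-molecule partition (collect oxygens, buffer hydrogens, append buffer)
-- by one stable sort per molecule keyed on "is not the oxygen type" (idiomatic; same cost).

-- ===== PORT A =====
-- dict lookup d[k] (first match in the association list); Pre_ guarantees the key is present,
-- so the default of pvLookupD is never reached (Python would raise KeyError there).
def pvLookup {β : Type} : List (String × β) → String → Option β
  | [], _ => none
  | (k, v) :: rest, x => if k == x then some v else pvLookup rest x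

def pvLookupD {β : Type} (xs : List (String × β)) (k : String) (d : β) : β :=
  (pvLookup xs k).getD d

-- literal transliteration of A: outer loop over the dict keys (looking each key up again),
-- inner loop appending oxygen atoms to wat_list and buffering the others in h_atoms, then the
-- buffered loop.  atom[2] and cfg['water_o_type'] are ported with defaults only reachable
-- outside Pre_ (Python raises IndexError / KeyError exactly there).
def sort_wat_mols (cfg : List (String × String)) (water_dict : List (String × List (List String))) : List (List String) :=
  water_dict.foldl (fun wat_list mol =>
    let s := (pvLookupD water_dict mol.1 []).foldl (fun s atom =>
      if PySem.List.pyGetD atom 2 "" == pvLookupD cfg "water_o_type" "" then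
        (s.1 ++ [atom], s.2)
      else
        (s.1, s.2 ++ [atom])) (wat_list, [])
    s.2.foldl (fun w a => w ++ [a]) s.1) []

-- ===== PORT B =====
-- transliteration of Source B: one stable sort per molecule; the Python bool key
-- a[2] != cfg[WAT_O_TYPE] (False < True) is ported as the Int key 0 / 1.
def sort_wat_mols_alt (cfg : List (String × String)) (water_dict : List (String × List (List String))) : List (List String) :=
  water_dict.foldl (fun wat_list mol =>
    wat_list ++ PySem.List.sorted mol.2
      (fun a => if PySem.List.pyGetD a 2 "" == pvLookupD cfg "water_o_type" "" then (0 : Int) else 1)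
      false) []

-- ===== PRECONDITION & SPEC =====
-- Pre_ excludes: (a) atoms with fewer than 3 fields and a cfg missing 'water_o_type' when some
-- atom exists — there Python A raises IndexError / KeyError; (b) association lists whose keys
-- repeat — a real Python dict cannot hold them, they are an artefact of the List encoding.
def Pre_sort_wat_mols (cfg : List (String × String)) (water_dict : List (String × List (List String))) : Prop :=
  (water_dict.map Prod.fst).Nodup ∧
  ∀ p ∈ water_dict, ∀ atom ∈ p.2, 3 ≤ atom.length ∧ "water_o_type" ∈ cfg.map Prod.fst
instance (cfg : List (String × String)) (water_dict : List (String × List (List String))) : Decidable (Pre_sort_wat_mols cfg water_dict) := by unfold Pre_sort_wat_mols; infer_instance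

def pvWitness_sort_wat_mols : (List (String × String)) × (List (String × List (List String))) :=
  ([("water_o_type", "OW")], [("1", [["9", "1", "HW"], ["8", "1", "OW"], ["7", "1", "HW"]])])

def Spec_sort_wat_mols (cfg : List (String × String)) (water_dict : List (String × List (List String))) (out : List (List String)) : Prop := out = sort_wat_mols_alt cfg water_dict
instance (cfg : List (String × String)) (water_dict : List (String × List (List String))) (out : List (List String)) : Decidable (Spec_sort_wat_mols cfg water_dict out) := by unfold Spec_sort_wat_mols; infer_instance

-- ===== CLAIM (what is proved, stated in full; the proofs are below) =====
def Claim_equal_sort_wat_mols : Prop := ∀ (cfg : List (String × String)) (water_dict : List (String × List (List String))), Dom_sort_wat_mols cfg water_dict → Pre_sort_wat_mols cfg water_dict → Spec_sort_wat_mols cfg water_dict (sort_wat_mols cfg water_dict)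

-- ===== LEMMAS AND PROOFS =====

theorem pvLookup_of_mem {β : Type} (wd : List (String × β)) (hnd : (wd.map Prod.fst).Nodup)
    (p : String × β) (hp : p ∈ wd) : pvLookup wd p.1 = some p.2 := by
  induction wd with
  | nil => cases hp
  | cons q rest ih =>
    simp only [List.map_cons, List.nodup_cons] at hnd
    rcases List.mem_cons.1 hp with h | h
    · subst h
      obtain ⟨k, v⟩ := p
      simp [pvLookup]
    · obtain ⟨k, v⟩ := q
      have hne : k ≠ p.1 := by
        intro he
        exact hnd.1 (he ▸ (List.mem_map.2 ⟨p, h, rfl⟩))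
      simp only [pvLookup]
      rw [if_neg (by simpa using hne)]
      exact ih hnd.2 h

theorem insertBy_append_left {α : Type} (before : α → α → Bool) (x : α) (zs os : List α)
    (h : ∀ z ∈ zs, before x z = false) :
    PySem.List.insertBy before x (zs ++ os) = zs ++ PySem.List.insertBy before x os := by
  induction zs with
  | nil => simp
  | cons z zs ih =>
    have hz : before x z = false := h z List.mem_cons_self
    simp only [List.cons_append, PySem.List.insertBy, hz, Bool.false_eq_true, if_false,
      List.cons.injEq, true_and]
    exact ih (fun y hy => h y (List.mem_cons_of_mem _ hy))

theorem insertBy_zero_ones {α : Type} (key : α → Int) (x : α) (os : List α)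
    (hx : key x = 0) (hos : ∀ o ∈ os, key o = 1) :
    PySem.List.insertBy (fun a b => decide (key a < key b)) x os = x :: os := by
  cases os with
  | nil => rfl
  | cons o os =>
    have ho : key o = 1 := hos o List.mem_cons_self
    simp [PySem.List.insertBy, hx, ho]

theorem foldl_insertBy_bool {α : Type} (key : α → Int) (hk : ∀ a, key a = 0 ∨ key a = 1)
    (xs : List α) : ∀ zs os : List α, (∀ z ∈ zs, key z = 0) → (∀ o ∈ os, key o = 1) →
    xs.foldl (fun acc x => PySem.List.insertBy (fun a b => decide (key a < key b)) x acc) (zs ++ os)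
      = (zs ++ xs.filter (fun a => key a == 0)) ++ (os ++ xs.filter (fun a => key a != 0)) := by
  induction xs with
  | nil => intro zs os _ _; simp
  | cons x xs ih =>
    intro zs os hzs hos
    simp only [List.foldl_cons]
    rcases hk x with hx | hx
    · have hstep : PySem.List.insertBy (fun a b => decide (key a < key b)) x (zs ++ os)
          = (zs ++ [x]) ++ os := by
        rw [insertBy_append_left _ _ _ _ (fun z hz => by simp [hzs z hz, hx]),
          insertBy_zero_ones key x os hx hos]
        simp
      rw [hstep, ih (zs ++ [x]) os
        (by intro z hz; rcases List.mem_append.1 hz with h | h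
            · exact hzs z h
            · simp at h; subst h; exact hx) hos]
      simp [hx]
    · have hstep : PySem.List.insertBy (fun a b => decide (key a < key b)) x (zs ++ os)
          = zs ++ (os ++ [x]) := by
        rw [PySem.List.insertBy_of_forall_not_before _ _ _ (fun y hy => by
          rcases List.mem_append.1 hy with h | h
          · simp [hzs y h, hx]
          · simp [hos y h, hx])]
        simp
      rw [hstep, ih zs (os ++ [x]) hzs
        (by intro o ho; rcases List.mem_append.1 ho with h | h
            · exact hos o h
            · simp at h; subst h; exact hx)]
      simp [hx]

theorem sorted_bool {α : Type} (key : α → Int) (hk : ∀ a, key a = 0 ∨ key a = 1)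
    (xs : List α) :
    PySem.List.sorted xs key false
      = xs.filter (fun a => key a == 0) ++ xs.filter (fun a => key a != 0) := by
  rw [PySem.List.sorted_eq_foldl_insertBy]
  simpa using foldl_insertBy_bool key hk xs [] [] (by simp) (by simp)

theorem inner_foldl_partition (p : List String → Bool) (atoms : List (List String)) :
    ∀ (w h : List (List String)),
    atoms.foldl (fun s atom => if p atom then (s.1 ++ [atom], s.2) else (s.1, s.2 ++ [atom])) (w, h)
      = (w ++ atoms.filter p, h ++ atoms.filter (fun a => !(p a))) := by
  induction atoms with
  | nil => intro w h; simp
  | cons a atoms ih =>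
    intro w h
    by_cases hp : p a = true
    · simp [hp, ih]
    · simp only [Bool.not_eq_true] at hp
      simp [hp, ih]

theorem foldl_append_singleton (xs acc : List (List String)) :
    xs.foldl (fun w a => w ++ [a]) acc = acc ++ xs := by
  induction xs generalizing acc with
  | nil => simp
  | cons x xs ih => simp [ih]

-- ===== VERDICT (by name: the statement is the Claim_ definition above) =====
theorem sort_wat_mols_spec : Claim_equal_sort_wat_mols := by
  intro cfg wd _ hpre
  obtain ⟨hnd, hat⟩ := hpre
  unfold Spec_sort_wat_mols sort_wat_mols sort_wat_mols_alt
  set p : List String → Bool :=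
    fun a => PySem.List.pyGetD a 2 "" == pvLookupD cfg "water_o_type" "" with hpdef
  set key : List String → Int := fun a => if p a then (0 : Int) else 1 with hkey
  apply PySem.List.foldl_congr_mem
  intro acc mol hmol
  -- A's body
  have hlook : pvLookupD wd mol.1 [] = mol.2 := by
    unfold pvLookupD; rw [pvLookup_of_mem wd hnd mol hmol]; rfl
  rw [hlook, inner_foldl_partition p mol.2, foldl_append_singleton]
  -- B's body
  have hkbool : ∀ a, key a = 0 ∨ key a = 1 := by
    intro a; by_cases h : p a <;> simp [hkey, h]
  rw [sorted_bool key hkbool mol.2]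
  have h0 : (fun a => key a == 0) = p := by
    funext a; by_cases h : p a <;> simp [hkey, h]
  have h1 : (fun a => key a != 0) = fun a => !(p a) := by
    funext a; by_cases h : p a <;> simp [hkey, h]
  rw [h0, h1]
  simp
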